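-- pv_equiv track=rewrite | github.com/KelliMK/CP431 | assignment_01.py | find_largest_gap
-- ===== SOURCE A (Python) =====
-- def find_largest_gap(prime_list):
--     max_gap = 0
--     gap_vals = []
--     for i in range(1, len(prime_list)):
--         gap = prime_list[i] - prime_list[i-1]
--         if gap > max_gap:
--             max_gap = gap
--             gap_vals = [prime_list[i-1], prime_list[i]]
--     return max_gap, gap_vals
-- ===== SOURCE B (Python) =====
-- def find_largest_gap(prime_list):
--     pairs = list(zip(prime_list, prime_list[1:]))
--     max_gap = max((b - a for a, b in pairs), default=0)
--     if max_gap <= 0: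
--         return 0, []
--     a, b = next((a, b) for a, b in pairs if b - a == max_gap)
--     return max_gap, [a, b]
-- ===== Notes on version B (the rewrite author's own statement) =====
-- stated objective: alternative
-- what changed: A fuses value and location into one running-max loop over indices; B decomposes into two passes over the zipped consecutive pairs: first compute the maximal gap (max with default 0), then, only if it is positive, locate its first occurrence.
import Mathlib
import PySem

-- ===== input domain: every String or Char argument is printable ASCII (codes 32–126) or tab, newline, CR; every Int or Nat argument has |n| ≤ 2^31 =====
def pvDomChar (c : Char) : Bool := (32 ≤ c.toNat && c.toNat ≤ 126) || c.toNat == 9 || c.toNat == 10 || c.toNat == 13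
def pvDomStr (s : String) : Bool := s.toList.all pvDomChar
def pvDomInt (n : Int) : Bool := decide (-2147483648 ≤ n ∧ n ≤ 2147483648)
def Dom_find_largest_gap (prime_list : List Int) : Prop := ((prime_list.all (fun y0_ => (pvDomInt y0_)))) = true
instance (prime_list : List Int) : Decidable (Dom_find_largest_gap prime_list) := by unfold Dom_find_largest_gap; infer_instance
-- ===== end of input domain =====

-- B is a two-pass re-decomposition (first compute the maximal gap, then locate its first
-- occurrence), vs A's fused single-pass running max; objective: alternative, not faster.

-- ===== PORT A =====
def find_largest_gap (prime_list : List Int) : Int × List Int :=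
  (PySem.List.pyRange 1 (prime_list.length : Int) 1).foldl
    (fun st i =>
      let gap := PySem.List.pyGetD prime_list i 0 - PySem.List.pyGetD prime_list (i-1) 0
      if gap > st.1 then
        (gap, [PySem.List.pyGetD prime_list (i-1) 0, PySem.List.pyGetD prime_list i 0])
      else st)
    (0, [])
-- indices i and i-1 are always in range for i ∈ range(1, len), so pyGetD is exact here

-- ===== PORT B =====
def find_largest_gap_alt (prime_list : List Int) : Int × List Int :=
  let pairs := prime_list.zip (PySem.List.slice prime_list (some 1) none)
  let max_gap := PySem.List.maxD (pairs.map (fun p => p.2 - p.1)) (fun x => x) 0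
  if max_gap ≤ 0 then (0, [])
  else
    match pairs.find? (fun p => p.2 - p.1 == max_gap) with
    | some p => (max_gap, [p.1, p.2])
    | none => (0, [])  -- unreachable: max_gap > 0 implies it is attained by some pair

-- ===== PRECONDITION & SPEC =====
def Spec_find_largest_gap (prime_list : List Int) (out : Int × List Int) : Prop := out = find_largest_gap_alt prime_list
instance (prime_list : List Int) (out : Int × List Int) : Decidable (Spec_find_largest_gap prime_list out) := by unfold Spec_find_largest_gap; infer_instance

-- ===== CLAIM (what is proved, stated in full; the proofs are below) =====
def Claim_equal_find_largest_gap : Prop := ∀ (prime_list : List Int), Dom_find_largest_gap prime_list → Spec_find_largest_gap prime_list (find_largest_gap prime_list)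

-- ===== LEMMAS AND PROOFS =====

/-- Structural form of A's loop: walk the list keeping the previous element. -/
def goA (prev : Int) (xs : List Int) (st : Int × List Int) : Int × List Int :=
  match xs with
  | [] => st
  | x :: rest =>
      goA x rest (if x - prev > st.1 then (x - prev, [prev, x]) else st)

/-- The fused step on consecutive pairs. -/
def stepP (st : Int × List Int) (p : Int × Int) : Int × List Int :=
  if p.2 - p.1 > st.1 then (p.2 - p.1, [p.1, p.2]) else st

lemma goA_eq_fold (xs : List Int) : ∀ (prev : Int) (st : Int × List Int),
    goA prev xs st = ((prev :: xs).zip xs).foldl stepP st := by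
  induction xs with
  | nil => intro prev st; simp [goA]
  | cons x rest ih =>
      intro prev st
      simp [goA, List.zip, stepP, ih x]

lemma loopA (l : List Int) : ∀ (n k : Nat) (st : Int × List Int),
    1 ≤ k → k + n = l.length →
    (PySem.List.pyRange (k : Int) (l.length : Int) 1).foldl
      (fun st i =>
        let gap := PySem.List.pyGetD l i 0 - PySem.List.pyGetD l (i-1) 0
        if gap > st.1 then
          (gap, [PySem.List.pyGetD l (i-1) 0, PySem.List.pyGetD l i 0])
        else st) st
    = goA (l.getD (k-1) 0) (l.drop k) st := by
  intro n
  induction n with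
  | zero =>
      intro k st hk hlen
      have hnil : PySem.List.pyRange (k : Int) (l.length : Int) = [] :=
        PySem.List.pyRange_one_eq_nil (by omega)
      rw [hnil]
      rw [List.drop_of_length_le (by omega)]
      simp [goA]
  | succ n ih =>
      intro k st hk hlen
      have hklt : k < l.length := by omega
      rw [PySem.List.pyRange_one_cons (by exact_mod_cast hklt)]
      rw [List.foldl_cons]
      have hc1 : ((k : Int) - 1) = ((k - 1 : Nat) : Int) := by omega
      have hc2 : ((k : Int) + 1) = ((k + 1 : Nat) : Int) := by omega
      simp only [hc1, hc2, PySem.List.pyGetD_natCast]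
      rw [ih (k+1) _ (by omega) (by omega)]
      rw [List.drop_eq_getElem_cons hklt]
      simp only [goA, Nat.add_sub_cancel, List.getD_eq_getElem l 0 hklt]

lemma fold_char (ps : List (Int × Int)) : ∀ (c : Int) (v : List Int),
    ps.foldl stepP (c, v) =
      (if ps.foldl (fun m p => max m (p.2 - p.1)) c ≤ c then (c, v)
       else
         match ps.find? (fun p => p.2 - p.1 == ps.foldl (fun m p => max m (p.2 - p.1)) c) with
         | some p => (ps.foldl (fun m p => max m (p.2 - p.1)) c, [p.1, p.2])
         | none => (c, v)) := by
  induction ps with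
  | nil => intro c v; simp
  | cons q t ih =>
      intro c v
      have hmono := (PySem.List.le_foldl_max_int t (fun p : Int × Int => p.2 - p.1) (max c (q.2 - q.1))).1
      by_cases h : q.2 - q.1 > c
      · have hmax : max c (q.2 - q.1) = q.2 - q.1 := by omega
        simp only [List.foldl_cons, stepP, if_pos h, hmax] at *
        rw [ih]
        by_cases hM : t.foldl (fun m p => max m (p.2 - p.1)) (q.2 - q.1) ≤ q.2 - q.1
        · have hMe : t.foldl (fun m p => max m (p.2 - p.1)) (q.2 - q.1) = q.2 - q.1 := le_antisymm hM hmono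
          rw [if_pos hM, if_neg (by omega)]
          rw [List.find?_cons_of_pos (by simp [hMe])]
          simp [hMe]
        · rw [if_neg hM, if_neg (by omega)]
          rw [List.find?_cons_of_neg (by simp; omega)]
          have h2 : t.foldl (fun m p => max m (p.2 - p.1)) (q.2 - q.1)
              = (t.map (fun p : Int × Int => p.2 - p.1)).foldl max (q.2 - q.1) := by
            simp [List.foldl_map]
          have hmem : ∃ p ∈ t, p.2 - p.1 = t.foldl (fun m p => max m (p.2 - p.1)) (q.2 - q.1) := by
            rcases PySem.List.foldl_max_mem (t.map (fun p : Int × Int => p.2 - p.1)) (q.2 - q.1)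
              with he | hin
            · exfalso; rw [h2] at hM; omega
            · rw [h2]; simpa using hin
          obtain ⟨p, hp, hgap⟩ := hmem
          cases hf : t.find? (fun p => p.2 - p.1 == t.foldl (fun m p => max m (p.2 - p.1)) (q.2 - q.1)) with
          | some r => rfl
          | none =>
              exfalso
              have := List.find?_eq_none.mp hf p hp
              simp [hgap] at this
      · have hmax : max c (q.2 - q.1) = c := by omega
        simp only [List.foldl_cons, stepP, if_neg h, hmax] at *
        rw [ih]
        by_cases hM : t.foldl (fun m p => max m (p.2 - p.1)) c ≤ c
        · rw [if_pos hM, if_pos hM]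
        · rw [if_neg hM, if_neg hM]
          rw [List.find?_cons_of_neg (by simp; omega)]

lemma foldl_max_max (xs : List Int) : ∀ (a b : Int),
    xs.foldl max (max a b) = max a (xs.foldl max b) := by
  induction xs with
  | nil => intro a b; simp
  | cons x t ih =>
      intro a b
      simp only [List.foldl_cons]
      rw [max_assoc, ih]

-- ===== VERDICT (by name: the statement is the Claim_ definition above) =====
theorem find_largest_gap_spec : Claim_equal_find_largest_gap := by
  intro l _
  show find_largest_gap l = find_largest_gap_alt l
  cases l with
  | nil => decide
  | cons x xs =>
      unfold find_largest_gap find_largest_gap_alt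
      have hA := loopA (x :: xs) xs.length 1 (0, []) (by omega) (by rw [List.length_cons]; omega)
      simp only [Nat.cast_one, show (1:Nat) - 1 = 0 from rfl] at hA
      rw [hA]
      simp only [List.drop_one, List.tail_cons, List.getD_cons_zero]
      rw [goA_eq_fold, PySem.List.slice_from_one, List.tail_cons]
      rw [fold_char]
      simp only [PySem.List.maxD]
      -- relate max over mapped gaps to the fold
      cases hps : (x :: xs).zip xs with
      | nil => simp
      | cons q t =>
          rw [List.map_cons, PySem.List.max?_id_cons, Option.getD_some]
          have hfm : ∀ (i : Int), (q :: t).foldl (fun m p => max m (p.2 - p.1)) i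
              = (t.map (fun p => p.2 - p.1)).foldl max (max i (q.2 - q.1)) := by
            intro i
            simp [List.foldl_map]
          have hM : (q :: t).foldl (fun m p => max m (p.2 - p.1)) 0
              = max 0 ((t.map (fun p => p.2 - p.1)).foldl max (q.2 - q.1)) := by
            rw [hfm, foldl_max_max]
          set m := (t.map (fun p => p.2 - p.1)).foldl max (q.2 - q.1) with hm
          by_cases hle : m ≤ 0
          · rw [if_pos (by rw [hM]; omega), if_pos hle]
          · rw [if_neg (by rw [hM]; omega), if_neg hle]
            have : max (0:Int) m = m := by omega
            rw [hM, this]
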